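-- pv_equiv track=rewrite | github.com/Rohangambig/Jumpwhere | Assignment-5/smallestLargest.py | smallestLargest
-- ===== SOURCE A (Python) =====
-- def smallestLargest(string):
--     arr = string.split(' ')
--
--     min = float('inf')
--     max = float('-inf')
--
--     for words in arr:
--         if len(words) > max: max = len(words)
--         if len(words) < min: min = len(words)
--
--     return {min,max}
-- ===== SOURCE B (Python) =====
-- def smallestLargest(string):
--     lengths = sorted(len(w) for w in string.split(' '))
--     return {lengths[0], lengths[-1]}
-- ===== Notes on version B (the rewrite author's own statement) =====
-- stated objective: alternative
-- what changed: Replaces the fused linear scan tracking min and max with float infinities by sorting the word lengths once and reading the extremes off the ends of the sorted list.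
import Mathlib
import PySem

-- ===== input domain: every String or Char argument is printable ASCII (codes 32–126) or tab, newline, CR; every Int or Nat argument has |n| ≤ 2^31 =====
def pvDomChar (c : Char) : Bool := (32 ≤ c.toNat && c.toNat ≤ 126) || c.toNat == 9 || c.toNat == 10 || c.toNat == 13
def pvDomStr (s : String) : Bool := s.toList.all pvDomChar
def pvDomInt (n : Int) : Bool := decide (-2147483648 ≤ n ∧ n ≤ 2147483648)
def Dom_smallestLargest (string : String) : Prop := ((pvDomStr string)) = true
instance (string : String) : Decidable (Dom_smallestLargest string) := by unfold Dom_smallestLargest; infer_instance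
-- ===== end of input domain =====

-- B sorts the word lengths once and reads the extremes off the two ends of the sorted list,
-- instead of A's fused loop tracking both extremes from float infinities (alternative algorithm; O(n log n) vs O(n)).


-- ===== PORT A =====
-- float('inf') / float('-inf') are modelled as `none`: the two `match … | none => true` branches
-- are exactly 'anything > -inf' / 'anything < inf'; split(' ') is never empty, so the final
-- .getD 0 defaults are never reached.  Python checks max first, then min — same order here.
def pvStepA (p : Option Int × Option Int) (l : Int) : Option Int × Option Int :=
  let mx := if (match p.2 with | none => true | some m => l > m) then some l else p.2
  let mn := if (match p.1 with | none => true | some m => l < m) then some l else p.1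
  (mn, mx)

def smallestLargest (string : String) : List Int :=
  let arr := (PySem.Str.split? string " ").getD []   -- sep is the literal " " ≠ "", so split? is always some
  let st := arr.foldl (fun p words => pvStepA p (PySem.Str.len words)) (none, none)
  PySem.Set.ofList [st.1.getD 0, st.2.getD 0]

-- ===== PORT B =====
-- sorted word lengths; lengths[0] and lengths[-1] via pyGet? (split(' ') is never empty,
-- so the index never raises and the .getD 0 defaults are never reached).
def smallestLargest_alt (string : String) : List Int :=
  let lengths := PySem.List.sorted (((PySem.Str.split? string " ").getD []).map PySem.Str.len) (fun y => y) false
  PySem.Set.ofList [(PySem.List.pyGet? lengths 0).getD 0, (PySem.List.pyGet? lengths (-1)).getD 0]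

-- ===== PRECONDITION & SPEC =====
def Spec_smallestLargest (string : String) (out : List Int) : Prop := out = smallestLargest_alt string
instance (string : String) (out : List Int) : Decidable (Spec_smallestLargest string out) := by unfold Spec_smallestLargest; infer_instance

-- ===== CLAIM =====
def Claim_equal_smallestLargest : Prop := ∀ (string : String), Dom_smallestLargest string → Spec_smallestLargest string (smallestLargest string)

-- ===== LEMMAS AND PROOFS =====

-- once both components are some, A's loop is the running min / running max
theorem pv_fold_some (t : List Int) (a b : Int) :
    t.foldl pvStepA (some a, some b)
    = (some (t.foldl min a), some (t.foldl max b)) := by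
  induction t generalizing a b with
  | nil => simp
  | cons x t ih =>
    simp only [List.foldl_cons, pvStepA]
    have hmx : (if (match (some b : Option Int) with | none => true | some m => x > m) = true
                then some x else some b) = some (max b x) := by
      by_cases h : b < x <;> simp [h] <;> omega
    have hmn : (if (match (some a : Option Int) with | none => true | some m => x < m) = true
                then some x else some a) = some (min a x) := by
      by_cases h : x < a <;> simp [h] <;> omega
    rw [hmx, hmn, ih]

-- A's fold from the infinities is min?/max? of the same list
theorem pv_fold_eq (ls : List Int) :
    ls.foldl pvStepA (none, none)
    = (PySem.List.min? ls (fun y => y), PySem.List.max? ls (fun y => y)) := by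
  cases ls with
  | nil => simp [PySem.List.min?, PySem.List.max?]
  | cons x t =>
    simp only [List.foldl_cons, pvStepA, if_true]
    rw [pv_fold_some, PySem.List.min?_id_cons, PySem.List.max?_id_cons]

-- the head of the sorted list is min(ls)
theorem pv_head_sorted (ls : List Int) :
    PySem.List.pyGet? (PySem.List.sorted ls (fun y => y) false) 0
    = PySem.List.min? ls (fun y => y) := by
  cases hs : PySem.List.sorted ls (fun y => y) false with
  | nil =>
    have h0 : ls = [] := (PySem.List.sorted_eq_nil_iff ls _ false).1 hs
    subst h0
    simp [PySem.List.pyGet?, PySem.List.min?]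
  | cons m t =>
    rw [PySem.List.pyGet?_zero_cons]
    have hmem : m ∈ ls := by
      have : m ∈ PySem.List.sorted ls (fun y => y) false := by rw [hs]; exact List.mem_cons_self
      exact (PySem.List.mem_sorted ls _ false m).1 this
    obtain ⟨mm, hmm⟩ : ∃ mm, PySem.List.min? ls (fun y => y) = some mm := by
      cases h : PySem.List.min? ls (fun y => y) with
      | none =>
        exact absurd ((PySem.List.min?_eq_none_iff ls _).1 h) (by rintro rfl; simp at hmem)
      | some v => exact ⟨v, rfl⟩
    rw [hmm]
    have h1 : m ≤ mm := PySem.List.key_head_sorted_le ls (fun y => y) hs mm (PySem.List.min?_mem hmm)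
    have h2 : mm ≤ m := PySem.List.min?_isMin hmm m hmem
    simp only at h1 h2
    exact congrArg some (le_antisymm h1 h2)

-- the last element of the sorted list is max(ls)
theorem pv_last_sorted (ls : List Int) :
    PySem.List.pyGet? (PySem.List.sorted ls (fun y => y) false) (-1)
    = PySem.List.max? ls (fun y => y) := by
  rw [PySem.List.pyGet?_neg_one]
  cases hls : ls with
  | nil => simp [PySem.List.sorted, PySem.List.max?]
  | cons x t =>
    have hne : PySem.List.sorted (x :: t) (fun y => y) false ≠ [] := by
      intro h
      exact absurd ((PySem.List.sorted_eq_nil_iff (x :: t) _ false).1 h) (by simp)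
    set s := PySem.List.sorted (x :: t) (fun y => y) false with hsdef
    have hlen : 0 < s.length := List.length_pos_iff.2 hne
    have hlast : s.getLast? = some s[s.length - 1] := by
      rw [List.getLast?_eq_getElem?, List.getElem?_eq_getElem (by omega)]
    rw [hlast]
    obtain ⟨M, hM⟩ : ∃ M, PySem.List.max? (x :: t) (fun y => y) = some M := by
      cases h : PySem.List.max? (x :: t) (fun y => y) with
      | none => exact absurd ((PySem.List.max?_eq_none_iff (x :: t) _).1 h) (by simp)
      | some v => exact ⟨v, rfl⟩
    rw [hM]
    have hmemL : s[s.length - 1] ∈ x :: t := by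
      have hmm : s[s.length - 1] ∈ s := List.getElem_mem _
      exact (PySem.List.mem_sorted (x :: t) _ false _).1 hmm
    have h1 : s[s.length - 1] ≤ M := PySem.List.max?_isMax hM _ hmemL
    have h2 : M ≤ s[s.length - 1] := by
      have hMs : M ∈ s := (PySem.List.mem_sorted (x :: t) _ false M).2 (PySem.List.max?_mem hM)
      obtain ⟨p, hp, hpe⟩ := List.mem_iff_getElem.1 hMs
      have hmono := PySem.List.key_sorted_getElem_mono (x :: t) (fun y => y)
        (p := p) (q := s.length - 1) (by omega) (by exact Nat.sub_lt hlen Nat.one_pos)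
      simpa [← hsdef, hpe] using hmono
    exact congrArg some (le_antisymm h1 h2)

-- ===== VERDICT =====
theorem smallestLargest_spec : Claim_equal_smallestLargest := by
  intro s _
  unfold Spec_smallestLargest smallestLargest smallestLargest_alt
  simp only [← List.foldl_map (f := PySem.Str.len) (g := pvStepA), pv_fold_eq,
    pv_head_sorted, pv_last_sorted]
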